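-- pv_equiv track=rewrite | github.com/SamBauter/Py_DS_Algo | Ch1Ex/C.py | findOddProduct
-- ===== SOURCE A (Python) =====
-- def findOddProduct(data):
--     for i in range(len(data)):
--         j = i + 1
--         while j < len(data):
--             if data[i] * data[j] % 2 == 1:
--                 return True
--             else:
--                 j = j + 1
--     return False
-- ===== SOURCE B (Python) =====
-- def findOddProduct(data):
--     # single pass: a pair with odd product exists iff there are at least two odd numbers
--     odds = 0
--     for x in data:
--         if x % 2 == 1:
--             odds = odds + 1
--             if odds == 2:
--                 return True
--     return False
-- ===== Notes on version B (the rewrite author's own statement) =====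
-- stated objective: simpler
-- what changed: Replaces the nested pair scan with a single pass counting odd numbers (a pair's product is odd iff both factors are odd), returning True as soon as two odds are seen.
import Mathlib
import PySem

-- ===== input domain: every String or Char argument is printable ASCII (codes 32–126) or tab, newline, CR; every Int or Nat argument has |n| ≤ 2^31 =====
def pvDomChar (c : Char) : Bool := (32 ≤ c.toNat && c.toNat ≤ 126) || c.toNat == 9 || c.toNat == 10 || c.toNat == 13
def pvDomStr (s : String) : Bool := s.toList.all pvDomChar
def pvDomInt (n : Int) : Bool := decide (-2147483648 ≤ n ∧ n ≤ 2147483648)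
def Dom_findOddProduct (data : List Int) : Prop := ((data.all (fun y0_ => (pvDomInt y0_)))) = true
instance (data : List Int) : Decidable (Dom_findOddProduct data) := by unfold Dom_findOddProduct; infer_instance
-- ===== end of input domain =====

-- B replaces A's nested pair scan with a single pass that counts odd numbers (simpler).

-- ===== PORT A =====
-- inner while-loop: j runs from its start to len(data), returns True on the first odd product
def pvInnerA (data : List Int) (xi : Int) (j : Nat) : Bool :=
  if h : j < data.length then
    if PySem.Int.mod (xi * data[j]) 2 == 1 then true else pvInnerA data xi (j + 1)
  else false
termination_by data.length - j

-- outer for-loop over i in range(len(data))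
def pvOuterA (data : List Int) (i : Nat) : Bool :=
  if h : i < data.length then
    if pvInnerA data data[i] (i + 1) then true else pvOuterA data (i + 1)
  else false
termination_by data.length - i

def findOddProduct (data : List Int) : Bool := pvOuterA data 0

-- ===== PORT B =====
-- single pass over the list, counting odds, returning True as soon as two are seen
def pvAltLoop (l : List Int) (odds : Int) : Bool :=
  match l with
  | [] => false
  | x :: rest =>
    if PySem.Int.mod x 2 == 1 then
      if odds + 1 == 2 then true else pvAltLoop rest (odds + 1)
    else pvAltLoop rest odds

def findOddProduct_alt (data : List Int) : Bool := pvAltLoop data 0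

-- ===== PRECONDITION & SPEC =====
def Spec_findOddProduct (data : List Int) (out : Bool) : Prop := out = findOddProduct_alt data
instance (data : List Int) (out : Bool) : Decidable (Spec_findOddProduct data out) := by unfold Spec_findOddProduct; infer_instance

-- ===== CLAIM (what is proved, stated in full; the proofs are below) =====
def Claim_equal_findOddProduct : Prop := ∀ (data : List Int), Dom_findOddProduct data → Spec_findOddProduct data (findOddProduct data)

-- ===== LEMMAS AND PROOFS =====

def pvOdd (x : Int) : Bool := PySem.Int.mod x 2 == 1

theorem pvOdd_mul (a b : Int) :
    (PySem.Int.mod (a * b) 2 == 1) = (pvOdd a && pvOdd b) := by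
  have h2 : (0:Int) < 2 := by norm_num
  simp only [pvOdd, PySem.Int.mod_eq_emod_of_pos h2]
  rw [Int.mul_emod]
  rcases Int.emod_two_eq a with ha | ha <;> rcases Int.emod_two_eq b with hb | hb <;>
    simp [ha, hb]

theorem pvCountP_drop_succ (data : List Int) (i : Nat) (h : i < data.length) :
    (data.drop i).countP pvOdd =
      (if pvOdd data[i] then 1 else 0) + (data.drop (i + 1)).countP pvOdd := by
  rw [List.drop_eq_getElem_cons h, List.countP_cons]
  split <;> omega

theorem pvInnerA_spec (data : List Int) (xi : Int) (j : Nat) :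
    pvInnerA data xi j = (pvOdd xi && decide (1 ≤ (data.drop j).countP pvOdd)) := by
  fun_induction pvInnerA data xi j with
  | case1 j h hodd =>
    rw [pvOdd_mul] at hodd
    rw [pvCountP_drop_succ data j h]
    simp_all
  | case2 j h hodd ih =>
    rw [pvOdd_mul] at hodd
    rw [pvCountP_drop_succ data j h, ih]
    by_cases hx : pvOdd xi <;> by_cases hj : pvOdd data[j] <;> simp_all
  | case3 j h =>
    have : data.drop j = [] := List.drop_eq_nil_of_le (by omega)
    simp [this]

theorem pvOuterA_spec (data : List Int) (i : Nat) :
    pvOuterA data i = decide (2 ≤ (data.drop i).countP pvOdd) := by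
  fun_induction pvOuterA data i with
  | case1 i h hin =>
    rw [pvInnerA_spec] at hin
    rw [pvCountP_drop_succ data i h]
    simp only [Bool.and_eq_true, decide_eq_true_eq] at hin
    obtain ⟨hi, hc⟩ := hin
    simp [hi]
    omega
  | case2 i h hin ih =>
    rw [pvInnerA_spec] at hin
    rw [pvCountP_drop_succ data i h, ih]
    by_cases hx : pvOdd data[i]
    · have hc : ¬ (1 ≤ (data.drop (i+1)).countP pvOdd) := by
        simpa [hx] using hin
      simp only [hx, if_true, decide_eq_decide]
      omega
    · simp [hx]
  | case3 i h =>
    have : data.drop i = [] := List.drop_eq_nil_of_le (by omega)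
    simp [this]

theorem pvAltLoop_spec (l : List Int) (odds : Int) (h0 : 0 ≤ odds) (h1 : odds < 2) :
    pvAltLoop l odds = decide (2 ≤ odds + l.countP pvOdd) := by
  induction l generalizing odds with
  | nil => simp [pvAltLoop]; omega
  | cons x rest ih =>
    rw [List.countP_cons]
    show (if pvOdd x then if odds + 1 == 2 then true else pvAltLoop rest (odds + 1)
          else pvAltLoop rest odds) = _
    by_cases hx : pvOdd x
    · by_cases h2 : odds + 1 = 2
      · simp only [hx, if_true, h2]
        simp
        omega
      · have hodds : odds = 0 := by omega
        simp only [hx, if_true, show (odds + 1 == 2) = false by simp [h2],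
          ih (odds + 1) (by omega) (by omega)]
        simp
        omega
    · simp only [hx, ih odds h0 h1]
      simp

-- ===== VERDICT (by name: the statement is the Claim_ definition above) =====
theorem findOddProduct_spec : Claim_equal_findOddProduct := by
  intro data _
  unfold Spec_findOddProduct findOddProduct findOddProduct_alt
  rw [pvOuterA_spec, List.drop_zero, pvAltLoop_spec data 0 (by norm_num) (by norm_num)]
  simp
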